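-- pv_equiv track=rewrite | github.com/gridvisi/Python_workspace | Zero 2 Hero Class/Flag_flag/6 kyu Is there a sequence re-occuring in the list.py | is_reoccuring
-- ===== SOURCE A (Python) =====
-- def is_reoccuring(items):
--     seen = set()
--     last = ''
--
--     for i in items:
--         if i not in seen:
--             seen.add(i)
--         elif i != last:
--             return True
--         last = i
--     return False
-- ===== SOURCE B (Python) =====
-- def is_reoccuring(items):
--     # Collapse consecutive runs, then check for any duplicate in the collapsed sequence.
--     collapsed = []
--     prev = None
--     for x in items:
--         if prev != x:
--             collapsed.append(x)
--         prev = x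
--     return len(set(collapsed)) != len(collapsed)
-- ===== Notes on version B (the rewrite author's own statement) =====
-- stated objective: alternative
-- what changed: Replaces A's single-pass seen-set/last bookkeeping with early return by a reduce-then-detect strategy: collapse consecutive equal elements into one, then report whether the collapsed sequence contains any duplicate (set size vs length).
import Mathlib
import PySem

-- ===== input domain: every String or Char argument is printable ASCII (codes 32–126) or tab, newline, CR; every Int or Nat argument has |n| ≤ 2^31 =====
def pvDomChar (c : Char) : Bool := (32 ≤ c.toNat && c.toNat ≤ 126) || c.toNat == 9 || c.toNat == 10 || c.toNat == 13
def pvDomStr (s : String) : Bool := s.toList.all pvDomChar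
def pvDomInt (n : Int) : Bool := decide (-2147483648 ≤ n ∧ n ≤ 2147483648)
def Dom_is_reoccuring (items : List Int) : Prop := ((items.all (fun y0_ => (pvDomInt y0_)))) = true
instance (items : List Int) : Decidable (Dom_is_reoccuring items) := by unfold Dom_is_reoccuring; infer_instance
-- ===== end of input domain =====

-- B collapses consecutive equal elements first and then checks the collapsed
-- sequence for any duplicate via set size, instead of A's single-pass
-- seen-set/last bookkeeping with early return. Return values agree everywhere.


-- ===== PORT A =====
-- Python's `last = ''` sentinel never equals an int, so it is modelled by
-- `none : Option Int` (some i ≠ none always, exactly like i != '' in Python).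
def pvLoopA : List Int → PySem.Set Int → Option Int → Bool
  | [], _, _ => false
  | i :: rest, seen, last =>
    if ¬ PySem.Set.contains seen i then
      pvLoopA rest (PySem.Set.add seen i) (some i)
    else if some i ≠ last then true
    else pvLoopA rest seen (some i)

def is_reoccuring (items : List Int) : Bool :=
  pvLoopA items PySem.Set.empty none

-- ===== PORT B =====
-- the `collapsed`/`prev` accumulation loop of Source B
def pvCollapse (items : List Int) : List Int :=
  (items.foldl
    (fun (s : List Int × Option Int) x =>
      if s.2 ≠ some x then (s.1 ++ [x], some x) else (s.1, some x))
    ([], none)).1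

def is_reoccuring_alt (items : List Int) : Bool :=
  decide (PySem.Set.len (PySem.Set.ofList (pvCollapse items)) ≠ PySem.List.len (pvCollapse items))

-- ===== PRECONDITION & SPEC =====
def Spec_is_reoccuring (items : List Int) (out : Bool) : Prop := out = is_reoccuring_alt items
instance (items : List Int) (out : Bool) : Decidable (Spec_is_reoccuring items out) := by unfold Spec_is_reoccuring; infer_instance

-- ===== CLAIM (what is proved, stated in full; the proofs are below) =====
def Claim_equal_is_reoccuring : Prop := ∀ (items : List Int), Dom_is_reoccuring items → Spec_is_reoccuring items (is_reoccuring items)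

-- ===== LEMMAS AND PROOFS =====

-- run-collapse relative to the previous element
def ccolO : Option Int → List Int → List Int
  | _, [] => []
  | last, x :: xs => if last = some x then ccolO last xs else x :: ccolO (some x) xs

theorem foldlB_eq_ccolO (l : List Int) (pre : List Int) (last : Option Int) :
    (l.foldl
      (fun (s : List Int × Option Int) x =>
        if s.2 ≠ some x then (s.1 ++ [x], some x) else (s.1, some x))
      (pre, last)).1 = pre ++ ccolO last l := by
  induction l generalizing pre last with
  | nil => simp [ccolO]
  | cons x xs ih =>
    rw [List.foldl_cons]
    by_cases h : last = some x
    · rw [if_neg (by simp [h]), ih]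
      simp [ccolO, h]
    · rw [if_pos (by simp [h]), ih]
      simp [ccolO, h, List.append_assoc]

theorem set_add_eq (s : List Int) (x : Int) :
    PySem.Set.add s x = if s.contains x then s else s ++ [x] := rfl

theorem foldl_add_length_le (xs : List Int) (s : List Int) :
    (xs.foldl PySem.Set.add s).length ≤ s.length + xs.length := by
  induction xs generalizing s with
  | nil => simp
  | cons x xs ih =>
    by_cases h : x ∈ s
    · have := ih s
      rw [List.foldl_cons, set_add_eq, if_pos (by simpa using h)]
      simp at this ⊢
      omega
    · have := ih (s ++ [x])
      rw [List.foldl_cons, set_add_eq, if_neg (by simpa using h)]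
      simp at this ⊢
      omega

theorem foldl_add_of_nodup (xs : List Int) (s : List Int) (h : (s ++ xs).Nodup) :
    xs.foldl PySem.Set.add s = s ++ xs := by
  induction xs generalizing s with
  | nil => simp
  | cons x xs ih =>
    have hx : x ∉ s := by
      intro hm
      have := List.disjoint_of_nodup_append h
      exact this hm (by simp)
    have h2 : ((s ++ [x]) ++ xs).Nodup := by simpa using h
    rw [List.foldl_cons, set_add_eq, if_neg (by simpa using hx)]
    simpa using ih (s ++ [x]) h2

theorem foldl_add_length_lt (xs : List Int) (s : List Int) (hs : s.Nodup)
    (h : ¬ (s ++ xs).Nodup) :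
    (xs.foldl PySem.Set.add s).length < s.length + xs.length := by
  induction xs generalizing s with
  | nil => simp at h; exact absurd hs h
  | cons x xs ih =>
    by_cases hx : x ∈ s
    · have := foldl_add_length_le xs s
      rw [List.foldl_cons, set_add_eq, if_pos (by simpa using hx)]
      simp at this ⊢
      omega
    · have h2 : ¬ ((s ++ [x]) ++ xs).Nodup := by
        intro hn; exact h (by simpa using hn)
      have hs2 : (s ++ [x]).Nodup := by simp [List.nodup_append, hs]; exact fun a ha he => hx (he ▸ ha)
      have := ih (s ++ [x]) hs2 h2
      rw [List.foldl_cons, set_add_eq, if_neg (by simpa using hx)]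
      simp at this ⊢
      omega

theorem ofList_length_eq_iff (c : List Int) :
    (PySem.Set.ofList c).length = c.length ↔ c.Nodup := by
  constructor
  · intro h
    by_contra hn
    have := foldl_add_length_lt c [] (by simp) (by simpa using hn)
    rw [PySem.Set.ofList_eq_foldl] at h
    simp at this
    omega
  · intro h
    rw [PySem.Set.ofList_eq_foldl, foldl_add_of_nodup c [] (by simpa using h)]
    simp

theorem loopA_eq (l : List Int) (seen : PySem.Set Int) (last : Option Int)
    (hl : ∀ x, last = some x → x ∈ seen) :
    pvLoopA l seen last
      = !decide ((ccolO last l).Nodup ∧ ∀ x ∈ ccolO last l, x ∉ seen) := by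
  induction l generalizing seen last with
  | nil => simp [pvLoopA, ccolO]
  | cons i rest ih =>
    by_cases hc : i ∈ seen
    · by_cases hl' : last = some i
      · have hstep : pvLoopA (i :: rest) seen last = pvLoopA rest seen (some i) := by
          simp [pvLoopA, hc, hl']
        have hcol : ccolO last (i :: rest) = ccolO last rest := by
          simp only [ccolO, if_pos hl']
        rw [hstep, hcol, hl',
          ih seen (some i) (by rintro x hx; injection hx with h; subst h; exact hc)]
      · have hstep : pvLoopA (i :: rest) seen last = true := by
          simp [pvLoopA, hc]
          exact Or.inl (fun h => hl' h.symm)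
        have hcol : ccolO last (i :: rest) = i :: ccolO (some i) rest := by
          simp only [ccolO, if_neg hl']
        rw [hstep, hcol]
        simp [hc]
    · have hcb : PySem.Set.contains seen i = false := by
        simpa [PySem.Set.contains] using hc
      have hli : last ≠ some i := fun h => hc (hl i h)
      have hmemadd : ∀ x : Int, x ∈ PySem.Set.add seen i ↔ x ∈ seen ∨ x = i := by
        intro x; simp [PySem.Set.add, hc]
      have hstep : pvLoopA (i :: rest) seen last
          = pvLoopA rest (PySem.Set.add seen i) (some i) := by
        simp [pvLoopA, hc]
      have hcol : ccolO last (i :: rest) = i :: ccolO (some i) rest := by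
        simp only [ccolO, if_neg hli]
      rw [hstep, hcol, ih (PySem.Set.add seen i) (some i)
        (by rintro x hx; cases hx; exact (hmemadd i).mpr (Or.inr rfl))]
      congr 1
      apply decide_eq_decide.mpr
      constructor
      · rintro ⟨hn, hall⟩
        have hni : i ∉ ccolO (some i) rest :=
          fun hx => (hall i hx) ((hmemadd i).mpr (Or.inr rfl))
        refine ⟨List.nodup_cons.mpr ⟨hni, hn⟩, ?_⟩
        intro x hx
        rcases List.mem_cons.mp hx with rfl | hx'
        · exact hc
        · exact fun hs => hall x hx' ((hmemadd x).mpr (Or.inl hs))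
      · rintro ⟨hn2, hall⟩
        refine ⟨(List.nodup_cons.mp hn2).2, fun x hx hmem => ?_⟩
        rcases (hmemadd x).mp hmem with hs | rfl
        · exact hall x (List.mem_cons_of_mem _ hx) hs
        · exact (List.nodup_cons.mp hn2).1 hx

-- ===== VERDICT (by name: the statement is the Claim_ definition above) =====
theorem is_reoccuring_spec : Claim_equal_is_reoccuring := by
  intro items _
  unfold Spec_is_reoccuring is_reoccuring is_reoccuring_alt pvCollapse
  rw [foldlB_eq_ccolO]
  rw [loopA_eq items PySem.Set.empty none (by rintro x ⟨⟩)]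
  simp only [List.nil_append]
  have hlen := ofList_length_eq_iff (ccolO none items)
  by_cases hn : (ccolO none items).Nodup
  · simp [PySem.Set.len, PySem.List.len, hn, hlen.mpr hn, PySem.Set.empty]
  · have hne : (PySem.Set.ofList (ccolO none items)).length ≠ (ccolO none items).length :=
      fun h => hn (hlen.mp h)
    simp [PySem.Set.len, PySem.List.len, hn, hne, PySem.Set.empty]
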